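-- pv_equiv track=rewrite | github.com/Leo-Shogun/Quantum-Networks | scheduling.py | calculate_total_delay
-- ===== SOURCE A (Python) =====
-- from typing import List, Dict, Tuple
--
-- def calculate_total_delay(schedule: List[Tuple[str, int]]) -> int:
--     """
--     Calculate the total delay for a given schedule.
--     """
--     delay = 0
--     timeslot_counts = {}
--     for _, timeslot in schedule:
--         if timeslot not in timeslot_counts:
--             timeslot_counts[timeslot] = 0
--         timeslot_counts[timeslot] += 1
--
--     for timeslot, count in timeslot_counts.items():
--         delay += sum([timeslot - 1] * count)
--
--     return delay
-- ===== SOURCE B (Python) =====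
-- def calculate_total_delay(schedule):
--     """Calculate the total delay for a given schedule."""
--     return sum(timeslot - 1 for _, timeslot in schedule)
-- ===== Notes on version B (the rewrite author's own statement) =====
-- stated objective: simpler
-- what changed: B replaces A's two-phase computation (build a timeslot->count dict, then sum count copies of timeslot-1 per group via a materialized replicated list) with a single direct generator sum of timeslot-1 over the entries.
import Mathlib
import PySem

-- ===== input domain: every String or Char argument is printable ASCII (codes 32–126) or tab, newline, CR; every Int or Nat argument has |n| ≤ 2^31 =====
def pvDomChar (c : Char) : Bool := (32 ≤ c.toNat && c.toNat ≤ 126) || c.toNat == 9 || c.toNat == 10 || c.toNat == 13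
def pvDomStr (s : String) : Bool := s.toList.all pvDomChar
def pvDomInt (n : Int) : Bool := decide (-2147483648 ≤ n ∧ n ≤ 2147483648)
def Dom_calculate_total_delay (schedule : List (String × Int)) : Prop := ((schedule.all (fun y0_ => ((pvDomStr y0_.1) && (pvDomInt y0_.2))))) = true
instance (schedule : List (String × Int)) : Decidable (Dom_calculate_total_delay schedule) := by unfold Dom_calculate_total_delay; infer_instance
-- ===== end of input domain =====

-- B is a single direct pass summing timeslot-1 over the entries, instead of A's
-- grouping dict plus per-group replicated-list sums; same result, simpler.

-- ===== PORT A =====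
def calculate_total_delay (schedule : List (String × Int)) : Int :=
  -- first loop: build timeslot_counts
  let timeslot_counts : PySem.Dict Int Int :=
    schedule.foldl (fun d p =>
      let d := if d.contains p.2 then d else d.insert p.2 (0 : Int)
      d.insert p.2 (d.getD p.2 0 + 1)) PySem.Dict.empty
  -- second loop: delay += sum([timeslot - 1] * count)  ([x]*count is empty for count ≤ 0)
  timeslot_counts.items.foldl
    (fun delay kv => delay + (List.replicate kv.2.toNat (kv.1 - 1)).sum) 0

-- ===== PORT B =====
def calculate_total_delay_alt (schedule : List (String × Int)) : Int :=
  schedule.foldl (fun acc p => acc + (p.2 - 1)) 0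

-- ===== PRECONDITION & SPEC =====
def Spec_calculate_total_delay (schedule : List (String × Int)) (out : Int) : Prop := out = calculate_total_delay_alt schedule
instance (schedule : List (String × Int)) (out : Int) : Decidable (Spec_calculate_total_delay schedule out) := by unfold Spec_calculate_total_delay; infer_instance

-- ===== CLAIM (what is proved, stated in full; the proofs are below) =====
def Claim_equal_calculate_total_delay : Prop := ∀ (schedule : List (String × Int)), Dom_calculate_total_delay schedule → Spec_calculate_total_delay schedule (calculate_total_delay schedule)

-- ===== LEMMAS AND PROOFS =====

-- A's first-loop body equals the standard counting step.
theorem step_eq (d : PySem.Dict Int Int) (t : Int) :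
    (let d' := if d.contains t then d else d.insert t (0 : Int)
     d'.insert t (d'.getD t 0 + 1)) = d.insert t (d.getD t 0 + 1) := by
  by_cases h : d.contains t = true
  · rw [if_pos h]
  · have hc : d.contains t = false := by simpa using h
    simp only [hc, Bool.false_eq_true, if_false]
    rw [PySem.Dict.getD_insert_self, PySem.Dict.insert_insert_self,
      PySem.Dict.getD_of_not_contains (h := hc)]

-- sum over a nodup key list of count·(k-1) = sum of (x-1) over the list
theorem sum_count_mul (vs : List Int) (D : List Int) (hD : D.Nodup)
    (hm : ∀ k, k ∈ D ↔ k ∈ vs) :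
    (D.map (fun k => (vs.count k : Int) * (k - 1))).sum
      = (vs.map (fun x => x - 1)).sum := by
  induction vs generalizing D with
  | nil =>
    have hDnil : D = [] := by
      cases D with
      | nil => rfl
      | cons d D => exact absurd ((hm d).1 (by simp)) (by simp)
    simp [hDnil]
  | cons a t ih =>
    by_cases ha : a ∈ t
    · have hm' : ∀ k, k ∈ D ↔ k ∈ t := by
        intro k; rw [hm k]; constructor
        · intro h; rcases List.mem_cons.mp h with h | h
          · exact h ▸ ha
          · exact h
        · intro h; exact List.mem_cons_of_mem _ h
      have hsplit : (D.map (fun k => ((a :: t).count k : Int) * (k - 1))).sum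
          = (D.map (fun k => (t.count k : Int) * (k - 1))).sum
            + (D.map (fun k => if k = a then (k - 1) else 0)).sum := by
        rw [← List.sum_map_add]
        apply congrArg
        apply List.map_congr_left
        intro k _
        by_cases hk : k = a
        · subst hk
          have hc : (k :: t).count k = t.count k + 1 := by simp
          rw [hc, if_pos rfl]; push_cast; ring
        · have hne : ¬ a = k := fun he => hk he.symm
          have hc : (a :: t).count k = t.count k := by simp [hne]
          rw [hc, if_neg hk, add_zero]
      have hsingle : (D.map (fun k => if k = a then (k - 1) else 0)).sum = a - 1 := by
        have haD : a ∈ D := (hm a).2 (by simp)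
        rw [List.sum_map_eq_nsmul_single a _ (fun b hne _ => by rw [if_neg hne])]
        rw [List.count_eq_one_of_mem hD haD]
        simp
      rw [hsplit, hsingle, ih D hD hm', List.map_cons, List.sum_cons]
      ring
    · have haD : a ∈ D := (hm a).2 (by simp)
      have hperm : D.Perm (a :: D.erase a) := List.perm_cons_erase haD
      have herased : ∀ k ∈ D.erase a, k ≠ a ∧ k ∈ t := by
        intro k hk
        have h1 : k ≠ a ∧ k ∈ D := (List.Nodup.mem_erase_iff hD).mp hk
        refine ⟨h1.1, ?_⟩
        rcases List.mem_cons.mp ((hm k).1 h1.2) with h | h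
        · exact absurd h h1.1
        · exact h
      have hsum : (D.map (fun k => ((a :: t).count k : Int) * (k - 1))).sum
          = ((a :: t).count a : Int) * (a - 1)
            + ((D.erase a).map (fun k => ((a :: t).count k : Int) * (k - 1))).sum := by
        have := (hperm.map (fun k => ((a :: t).count k : Int) * (k - 1))).sum_eq
        simpa using this
      have hca : (a :: t).count a = t.count a + 1 := by simp
      have hct0 : t.count a = 0 := List.count_eq_zero.mpr ha
      have hmap : ((D.erase a).map (fun k => ((a :: t).count k : Int) * (k - 1)))
          = ((D.erase a).map (fun k => (t.count k : Int) * (k - 1))) := by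
        apply List.map_congr_left
        intro k hk
        have hne : ¬ a = k := fun he => (herased k hk).1 he.symm
        have hc : (a :: t).count k = t.count k := by simp [hne]
        rw [hc]
      have hih := ih (D.erase a) (hD.erase a) (fun k => by
        constructor
        · intro hk; exact (herased k hk).2
        · intro hk
          have hkD : k ∈ D := (hm k).2 (List.mem_cons_of_mem _ hk)
          have hkne : k ≠ a := by rintro rfl; exact ha hk
          exact (List.Nodup.mem_erase_iff hD).mpr ⟨hkne, hkD⟩)
      rw [hsum, hmap, hih, hca, hct0, List.map_cons, List.sum_cons]
      push_cast; ring

-- A computed through the counter characterisation.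
theorem calculate_total_delay_eq (schedule : List (String × Int)) :
    calculate_total_delay schedule
      = ((PySem.Set.ofList (schedule.map Prod.snd)).map
          (fun k => ((schedule.map Prod.snd).count k : Int) * (k - 1))).sum := by
  unfold calculate_total_delay
  have h1 : schedule.foldl (fun d p =>
      let d := if d.contains p.2 then d else d.insert p.2 (0 : Int)
      d.insert p.2 (d.getD p.2 0 + 1)) PySem.Dict.empty
      = PySem.Dict.counter (schedule.map Prod.snd) := by
    rw [← PySem.Dict.foldl_insert_getD_add_one_eq_counter, List.foldl_map]
    apply PySem.List.foldl_congr_mem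
    intro d p _
    exact step_eq d p.2
  rw [h1]
  simp only [PySem.Dict.items_counter, PySem.List.foldl_add, List.map_map, zero_add]
  apply congrArg
  apply List.map_congr_left
  intro k _
  simp only [Function.comp, List.sum_replicate, Int.toNat_natCast, nsmul_eq_mul]

-- ===== VERDICT (by name: the statement is the Claim_ definition above) =====
theorem calculate_total_delay_spec : Claim_equal_calculate_total_delay := by
  intro schedule _
  unfold Spec_calculate_total_delay calculate_total_delay_alt
  rw [calculate_total_delay_eq, PySem.List.foldl_add]
  rw [sum_count_mul (schedule.map Prod.snd) _ (PySem.Set.nodup_ofList _)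
    (fun k => PySem.Set.mem_ofList _ k)]
  simp [List.map_map, Function.comp_def]
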